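-- pv_equiv track=rewrite | github.com/Fertmeneses/coding_challenge_bottle_sets | codes/FM_solution.py | optim_sets
-- ===== SOURCE A (Python) =====
-- def optim_sets(stock):
-- 	"""
-- 	Find the maximum number of sets that can be made from the input list
-- 	{stock}, which represents a collection of bottles. All sets must be
-- 	made of one or two bottles, and all sets must share the same
-- 	total volume.
--
-- 	--- Inputs ---
-- 	{stock} [List]: Each element represents the volume of a single
-- 	bottle, in litres.
--
-- 	--- Outputs ---
-- 	{best_N} [Integer]: Maximum number of sets that can be made.
-- 	"""
--
-- 	# Implement your code here:
--
-- 	# PART 1: Make a first guess with single-bottle sets.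
--
-- 	# 1. Identify sub-groups with equal values:
-- 	vals = list(set(stock)) # Unique values
-- 	groups = {val: stock.count(val) for val in vals} # key=capacity, value=counts
--
-- 	# 2. Choose the highest counts as the first guess:
-- 	best_N = max(groups.values())
--
-- 	# PART 2: Explore two-bottle sets and improve {best_N} if possible.
--
-- 	# 3. Check the values of all sums and save them:
-- 	# (Note: the self-sum i+i is included, even if there is only one sample of that value)
-- 	sum_vals = [] # Initiate
-- 	for i in range(len(vals)):
-- 		for j in range(i,len(vals)):
-- 			sum_vals.append(vals[i]+vals[j]) # Add the sum value
-- 	sum_vals = list(set(sum_vals)) # Erase repetitions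
--
-- 	# 4. Count the sets with {sum_vals} values and update {N_best} if possible:
-- 	for sum_val in sum_vals:
-- 		check_vals = [] # Auxiliar list to avoid repeated counts
-- 		# Initiate counts with the summing value itself
-- 		n_sum = groups[sum_val] if sum_val in groups else 0
-- 		# Sum the contribution of each pair of correct values:
-- 		for val_i in groups:
-- 			# Check if there is a pair with this sum value:
-- 			val_j = sum_val-val_i # Proposed matching value
-- 			if val_i not in check_vals:
-- 				check_vals += [val_i,val_j] # Update check list
-- 				# Add sets to the current {sum_val} value:
-- 				if val_i == val_j and groups[val_i]>1:
-- 					n_sum += int(groups[val_i]/2)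
-- 				elif val_i != val_j and val_j in groups:
-- 					n_sum += min([groups[val_i],groups[val_j]])
-- 		# Update N_best if neccesary:
-- 		best_N = max([best_N,n_sum])
--
-- 	return best_N
-- ===== SOURCE B (Python) =====
-- def optim_sets(stock):
--     """Re-implementation: one counting pass, then a single nested pass over
--     unique values accumulating pair contributions into a dict keyed by the
--     pair sum (O(V^2) instead of A's per-sum rescan of all values, O(V^3))."""
--     counts = {}
--     for v in stock:
--         counts[v] = counts.get(v, 0) + 1
--     vals = list(counts)
--     pair_sets = {}
--     for i, a in enumerate(vals):
--         pair_sets[a + a] = pair_sets.get(a + a, 0) + counts[a] // 2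
--         for b in vals[i + 1:]:
--             s = a + b
--             pair_sets[s] = pair_sets.get(s, 0) + min(counts[a], counts[b])
--     best = max(counts.values())
--     for s, n in pair_sets.items():
--         best = max(best, n + counts.get(s, 0))
--     return best
-- ===== Notes on version B (the rewrite author's own statement) =====
-- stated objective: faster
-- what changed: Instead of rescanning all unique values for every candidate sum (with a check-list to avoid double counting), B builds the count dict in one pass and walks the unique values once, accumulating each pair's contribution into a dict keyed by its sum, then takes one max over that dict.
import Mathlib
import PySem

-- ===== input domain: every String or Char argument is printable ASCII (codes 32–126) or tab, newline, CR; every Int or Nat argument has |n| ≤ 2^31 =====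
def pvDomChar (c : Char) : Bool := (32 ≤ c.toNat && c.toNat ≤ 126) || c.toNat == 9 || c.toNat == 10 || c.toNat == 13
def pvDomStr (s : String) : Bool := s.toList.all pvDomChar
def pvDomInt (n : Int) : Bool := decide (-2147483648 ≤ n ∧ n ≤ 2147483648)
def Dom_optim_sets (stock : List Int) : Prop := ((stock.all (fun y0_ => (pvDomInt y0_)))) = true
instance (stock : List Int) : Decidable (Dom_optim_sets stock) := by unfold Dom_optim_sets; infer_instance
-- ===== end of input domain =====

-- B replaces A's per-sum rescan of all unique values by one counting pass and a single nested pass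
-- over unique values accumulating pair contributions into a dict keyed by the pair sum (objective: faster).

-- ===== PORT A =====
-- Literal port of A. `list(set(stock))` is PySem.Set.ofList (A's result does not depend on the set's
-- iteration order: it is a max over per-sum totals that are order-independent); `int(x/2)` is
-- PySem.Int.truncdiv; `max(...)` of a list is PySem.List.max? (the .getD 0 is unreachable under Pre_).
def optim_sets (stock : List Int) : Int :=
  let vals : List Int := PySem.Set.ofList stock
  let groups : PySem.Dict Int Int :=
    vals.foldl (fun d val => d.insert val ((stock.count val : Int))) PySem.Dict.empty
  let best_N0 : Int := (PySem.List.max? groups.values (fun x => x)).getD 0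
  let n : Int := PySem.List.len vals
  let sum_vals0 : List Int :=
    (PySem.List.pyRange 0 n 1).foldl (fun acc i =>
      (PySem.List.pyRange i n 1).foldl (fun acc2 j =>
        acc2 ++ [PySem.List.pyGetD vals i 0 + PySem.List.pyGetD vals j 0]) acc) []
  let sum_vals : List Int := PySem.Set.ofList sum_vals0
  sum_vals.foldl (fun best_N sum_val =>
    let n_sum0 : Int := if groups.contains sum_val then groups.getD sum_val 0 else 0
    let res : List Int × Int := groups.keys.foldl (fun st val_i =>
      let val_j := sum_val - val_i
      if val_i ∈ st.1 then st
      else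
        let check := st.1 ++ [val_i, val_j]
        if val_i = val_j ∧ 1 < groups.getD val_i 0 then
          (check, st.2 + PySem.Int.truncdiv (groups.getD val_i 0) 2)
        else if val_i ≠ val_j ∧ groups.contains val_j then
          (check, st.2 + min (groups.getD val_i 0) (groups.getD val_j 0))
        else (check, st.2)) ([], n_sum0)
    max best_N res.2) best_N0

-- ===== PORT B =====
-- Literal port of Source B: the counter built in one pass over stock; `for i, a in enumerate(vals)`
-- with inner `for b in vals[i+1:]` via PySem.List.enumerate and PySem.List.slice; `//` is floordiv.
def optim_sets_alt (stock : List Int) : Int :=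
  let counts : PySem.Dict Int Int :=
    stock.foldl (fun d v => d.insert v (d.getD v 0 + 1)) PySem.Dict.empty
  let vals : List Int := counts.keys
  let pair_sets : PySem.Dict Int Int :=
    (PySem.List.enumerate vals).foldl (fun d ia =>
      let i := ia.1
      let a := ia.2
      let d1 := d.insert (a + a) (d.getD (a + a) 0 + PySem.Int.floordiv (counts.getD a 0) 2)
      (PySem.List.slice vals (some (i + 1)) none).foldl (fun d b =>
        d.insert (a + b) (d.getD (a + b) 0 + min (counts.getD a 0) (counts.getD b 0))) d1)
      PySem.Dict.empty
  let best0 : Int := (PySem.List.max? counts.values (fun x => x)).getD 0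
  pair_sets.items.foldl (fun best sn => max best (sn.2 + counts.getD sn.1 0)) best0

-- ===== PRECONDITION & SPEC =====
-- Python A raises ValueError on the empty list (max() of an empty sequence); so does B.
def Pre_optim_sets (stock : List Int) : Prop := stock ≠ []
instance (stock : List Int) : Decidable (Pre_optim_sets stock) := by unfold Pre_optim_sets; infer_instance
def pvWitness_optim_sets : List Int := [1, 2, 2, 3]

def Spec_optim_sets (stock : List Int) (out : Int) : Prop := out = optim_sets_alt stock
instance (stock : List Int) (out : Int) : Decidable (Spec_optim_sets stock out) := by unfold Spec_optim_sets; infer_instance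

-- ===== CLAIM (what is proved, stated in full; the proofs are below) =====
def Claim_equal_optim_sets : Prop := ∀ (stock : List Int), Dom_optim_sets stock → Pre_optim_sets stock → Spec_optim_sets stock (optim_sets stock)

-- ===== LEMMAS AND PROOFS =====


theorem pv_counts_eq (stock : List Int) :
    stock.foldl (fun d v => d.insert v (d.getD v 0 + 1)) PySem.Dict.empty
      = PySem.Dict.counter stock :=
  PySem.Dict.foldl_insert_getD_add_one_eq_counter stock

theorem pv_groups_eq (stock : List Int) :
    (PySem.Set.ofList stock).foldl (fun d val => d.insert val ((stock.count val : Int)))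
        PySem.Dict.empty = PySem.Dict.counter stock := by
  apply PySem.Dict.ext
  rw [PySem.Dict.items_counter]
  have h := PySem.Dict.items_foldl_insert_fresh (PySem.Set.ofList stock) (fun a => a)
      (fun a => (stock.count a : Int)) PySem.Dict.empty
      (fun a _ => PySem.Dict.contains_empty a) (by simp [PySem.Set.nodup_ofList])
  simpa using h

theorem pv_getD_fold_add (key g : Int → Int) (l : List Int) (d : PySem.Dict Int Int) (s : Int) :
    (l.foldl (fun d b => d.insert (key b) (d.getD (key b) 0 + g b)) d).getD s 0
      = d.getD s 0 + ((l.filter (fun b => decide (key b = s))).map g).sum := by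
  induction l generalizing d with
  | nil => simp
  | cons a t ih =>
    simp only [List.foldl_cons, List.filter_cons, ih]
    rw [PySem.Dict.getD_insert]
    by_cases h : key a = s
    · simp [h]; ring
    · simp [h]; intro e; exact absurd e.symm h

theorem pv_filter_shift (a s : Int) (t : List Int) (ht : t.Nodup) :
    t.filter (fun b => decide (a + b = s)) = if s - a ∈ t then [s - a] else [] := by
  induction t with
  | nil => simp
  | cons x u ih =>
    simp only [List.nodup_cons] at ht
    rw [List.filter_cons]
    by_cases hx : a + x = s
    · have hxe : x = s - a := by omega
      subst hxe
      simp [hx, ih ht.2]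
      intro hmem
      exact absurd hmem ht.1
    · have hne : s - a ≠ x := by omega
      simp only [hx, decide_false, ih ht.2, List.mem_cons]
      simp [hne]

abbrev pvC (stock : List Int) (v : Int) : Int := (stock.count v : Int)

def pvGo (stock : List Int) : List Int → PySem.Dict Int Int → PySem.Dict Int Int
  | [], d => d
  | a :: t, d =>
      pvGo stock t
        (t.foldl (fun d b => d.insert (a + b) (d.getD (a + b) 0 + min (pvC stock a) (pvC stock b)))
          (d.insert (a + a) (d.getD (a + a) 0 + PySem.Int.floordiv (pvC stock a) 2)))

def pvSums : List Int → List Int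
  | [] => []
  | a :: t => ((a + a) :: t.map (a + ·)) ++ pvSums t

theorem pv_keys_pvGo (stock : List Int) (l : List Int) (d : PySem.Dict Int Int) :
    (pvGo stock l d).keys = PySem.Set.update d.keys (pvSums l) := by
  induction l generalizing d with
  | nil => simp [pvGo, pvSums, PySem.Set.update_nil]
  | cons a t ih =>
    rw [pvGo, ih, pvSums]
    rw [PySem.Dict.keys_foldl_insert_key t (fun b => a + b)
      (fun d b => d.getD (a + b) 0 + min (pvC stock a) (pvC stock b))]
    have h1 : (d.insert (a + a) (d.getD (a + a) 0 + PySem.Int.floordiv (pvC stock a) 2)).keys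
        = PySem.Set.add d.keys (a + a) := by
      by_cases hc : d.contains (a + a)
      · rw [PySem.Dict.keys_insert_of_contains _ _ hc,
          PySem.Set.add_of_mem ((PySem.Dict.contains_iff_mem_keys _ _).mp hc)]
      · rw [PySem.Dict.keys_insert_of_not_contains _ _ (by simpa using hc),
          PySem.Set.add_of_not_mem]
        intro hm
        exact hc ((PySem.Dict.contains_iff_mem_keys _ _).mpr hm)
    rw [h1]
    rw [PySem.Set.update_append, PySem.Set.update_cons]

theorem pv_mem_pvSums (s : Int) (l : List Int) :
    s ∈ pvSums l ↔ ∃ a ∈ l, ∃ b ∈ l, s = a + b := by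
  induction l with
  | nil => simp [pvSums]
  | cons x t ih =>
    rw [pvSums]
    simp only [List.mem_append, List.mem_cons, List.mem_map, ih]
    constructor
    · rintro ((h | ⟨b, hb, rfl⟩) | ⟨a, ha, b, hb, rfl⟩)
      · exact ⟨x, Or.inl rfl, x, Or.inl rfl, h⟩
      · exact ⟨x, Or.inl rfl, b, Or.inr hb, rfl⟩
      · exact ⟨a, Or.inr ha, b, Or.inr hb, rfl⟩
    · rintro ⟨a, ha, b, hb, rfl⟩
      rcases ha with rfl | ha <;> rcases hb with rfl | hb
      · exact Or.inl (Or.inl rfl)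
      · exact Or.inl (Or.inr ⟨b, hb, rfl⟩)
      · exact Or.inl (Or.inr ⟨a, ha, by ring⟩)
      · exact Or.inr ⟨a, ha, b, hb, rfl⟩

def pvFB (stock : List Int) (s : Int) : List Int → Int
  | [] => 0
  | a :: t =>
      ((if s = a + a then PySem.Int.floordiv (pvC stock a) 2 else 0)
        + (if s - a ∈ t then min (pvC stock a) (pvC stock (s - a)) else 0))
      + pvFB stock s t


theorem pv_getD_pvGo (stock : List Int) (s : Int) (l : List Int) (d : PySem.Dict Int Int)
    (hl : l.Nodup) : (pvGo stock l d).getD s 0 = d.getD s 0 + pvFB stock s l := by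
  induction l generalizing d with
  | nil => simp [pvGo, pvFB]
  | cons a t ih =>
    simp only [List.nodup_cons] at hl
    rw [pvGo, ih _ hl.2, pvFB]
    rw [pv_getD_fold_add (fun b => a + b) (fun b => min (pvC stock a) (pvC stock b))]
    rw [pv_filter_shift a s t hl.2]
    rw [PySem.Dict.getD_insert]
    by_cases hd : s = a + a
    · simp [hd, hl.1]
      ring
    · by_cases hm : s - a ∈ t
      · simp [hd, hm]
        ring
      · simp [hd, hm]

def pvF (stock : List Int) (s : Int) : List Int → List Int → Int
  | _, [] => 0
  | P, a :: t =>
      (if s - a ∈ P then 0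
       else if s - a = a then PySem.Int.floordiv (pvC stock a) 2
       else if s - a ∈ stock then min (pvC stock a) (pvC stock (s - a)) else 0)
      + pvF stock s (P ++ [a]) t

theorem pv_enum_fold (stock : List Int) (r P : List Int) (d : PySem.Dict Int Int) :
    (PySem.List.enumerate r (P.length : Int)).foldl (fun d ia =>
        (PySem.List.slice (P ++ r) (some (ia.1 + 1)) none).foldl
          (fun d b => d.insert (ia.2 + b) (d.getD (ia.2 + b) 0 + min (pvC stock ia.2) (pvC stock b)))
          (d.insert (ia.2 + ia.2) (d.getD (ia.2 + ia.2) 0 + PySem.Int.floordiv (pvC stock ia.2) 2))) d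
      = pvGo stock r d := by
  induction r generalizing P d with
  | nil => simp [PySem.List.enumerate, pvGo]
  | cons a t ih =>
    rw [PySem.List.enumerate_cons, List.foldl_cons, pvGo]
    have hsl : PySem.List.slice (P ++ a :: t) (some ((P.length : Int) + 1)) none = t := by
      have : (P.length : Int) + 1 = ((P.length + 1 : Nat) : Int) := by push_cast; ring
      rw [this, PySem.List.slice_from_natCast]
      have : P ++ a :: t = (P ++ [a]) ++ t := by simp
      rw [this, List.drop_left' (by simp)]
    rw [hsl]
    have harr : (P.length : Int) + 1 = ((P ++ [a]).length : Int) := by simp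
    have harr2 : P ++ a :: t = (P ++ [a]) ++ t := by simp
    rw [harr, harr2, ih (P ++ [a])]

theorem pv_F_eq_FB (stock : List Int) (s : Int) (r P : List Int)
    (h : P ++ r = PySem.Set.ofList stock) :
    pvF stock s P r = pvFB stock s r := by
  induction r generalizing P with
  | nil => rfl
  | cons a t ih =>
    have hnd : (P ++ a :: t).Nodup := h ▸ PySem.Set.nodup_ofList stock
    have hmem : ∀ x : Int, x ∈ stock ↔ x ∈ P ++ a :: t := by
      intro x
      rw [h, PySem.Set.mem_ofList]
    have hnd' : ((P ++ [a]) ++ t).Nodup := by simpa using hnd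
    obtain ⟨hPnd, hcons, hdisj⟩ := List.nodup_append.mp hnd
    have haP : a ∉ P := fun hc => hdisj a hc a List.mem_cons_self rfl
    have hat : a ∉ t := (List.nodup_cons.mp hcons).1
    have hPt : ∀ x ∈ P, x ∉ t := fun x hx hc => hdisj x hx x (List.mem_cons_of_mem a hc) rfl
    rw [pvF, pvFB, ih (P ++ [a]) (by simpa using h)]
    congr 1
    by_cases h1 : s - a ∈ P
    · have hd : ¬ s = a + a := by
        intro e; have : s - a = a := by omega
        exact haP (this ▸ h1)
      have h2 : s - a ∉ t := hPt _ h1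
      simp [h1, hd, h2]
    · by_cases hd : s - a = a
      · have hs : s = a + a := by omega
        have h2 : s - a ∉ t := by rw [hd]; exact hat
        simp [hs, haP, hat]
      · have hs : ¬ s = a + a := by intro e; exact hd (by omega)
        by_cases h3 : s - a ∈ stock
        · have h4 : s - a ∈ t := by
            have := (hmem (s - a)).mp h3
            simp only [List.mem_append, List.mem_cons] at this
            rcases this with hh | hh | hh
            · exact absurd hh h1
            · exact absurd hh hd
            · exact hh
          simp [h1, hd, hs, h3, h4]
        · have h4 : s - a ∉ t := fun hc => h3 ((hmem (s - a)).mpr (by simp [hc]))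
          simp [h1, hd, hs, h3, h4]

theorem pv_tdiv_eq_fdiv (n : Int) (h : 0 ≤ n) : PySem.Int.truncdiv n 2 = PySem.Int.floordiv n 2 := by
  show n.tdiv 2 = n.fdiv 2
  rw [Int.tdiv_eq_ediv_of_nonneg h, Int.fdiv_eq_ediv_of_nonneg n (by norm_num)]

theorem pv_A_inner (stock : List Int) (s : Int) (r P C : List Int) (n : Int)
    (hnd : (P ++ r).Nodup) (hsub : ∀ a ∈ r, a ∈ stock)
    (hC : ∀ a ∈ r, (a ∈ C ↔ s - a ∈ P)) :
    (r.foldl (fun st val_i =>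
        if val_i ∈ st.1 then st
        else
          if val_i = s - val_i ∧ 1 < pvC stock val_i then
            (st.1 ++ [val_i, s - val_i], st.2 + PySem.Int.truncdiv (pvC stock val_i) 2)
          else if val_i ≠ s - val_i ∧ (s - val_i) ∈ stock then
            (st.1 ++ [val_i, s - val_i], st.2 + min (pvC stock val_i) (pvC stock (s - val_i)))
          else (st.1 ++ [val_i, s - val_i], st.2)) (C, n)).2
      = n + pvF stock s P r := by
  induction r generalizing P C n with
  | nil => simp [pvF]
  | cons a t ih =>
    obtain ⟨hPnd, hcons, hdisj⟩ := List.nodup_append.mp hnd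
    have haP : a ∉ P := fun hc => hdisj a hc a List.mem_cons_self rfl
    have hat : a ∉ t := (List.nodup_cons.mp hcons).1
    have hnd' : ((P ++ [a]) ++ t).Nodup := by simpa using hnd
    rw [List.foldl_cons, pvF]
    by_cases hmC : a ∈ C
    · have hsaP : s - a ∈ P := (hC a List.mem_cons_self).mp hmC
      rw [if_pos hmC, if_pos hsaP]
      rw [ih (P ++ [a]) C n hnd' (fun b hb => hsub b (List.mem_cons_of_mem a hb))]
      · ring_nf
      · intro b hb
        rw [hC b (List.mem_cons_of_mem a hb)]
        constructor
        · intro hp; simp [hp]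
        · intro hp
          rcases List.mem_append.mp hp with hp | hp
          · exact hp
          · exfalso
            have hba : s - b = a := by simpa using hp
            have hbP : b ∈ P := by
              have : b = s - a := by omega
              rwa [this]
            exact hdisj b hbP b (List.mem_cons_of_mem a hb) rfl
    · have hsaP : s - a ∉ P := fun hp => hmC ((hC a List.mem_cons_self).mpr hp)
      rw [if_neg hmC, if_neg hsaP]
      have hinv : ∀ b ∈ t, (b ∈ C ++ [a, s - a] ↔ s - b ∈ P ++ [a]) := by
        intro b hb
        have hba : b ≠ a := fun e => hat (e ▸ hb)
        simp only [List.mem_append, List.mem_cons, List.not_mem_nil, or_false]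
        rw [hC b (List.mem_cons_of_mem a hb)]
        constructor
        · rintro (hp | hba' | hbsa)
          · exact Or.inl hp
          · exact absurd hba' hba
          · exact Or.inr (by omega)
        · rintro (hp | hsb)
          · exact Or.inl hp
          · exact Or.inr (Or.inr (by omega))
      have hca : 1 ≤ pvC stock a := by
        have := List.count_pos_iff.mpr (hsub a List.mem_cons_self)
        unfold pvC; exact_mod_cast this
      by_cases hd : a = s - a
      · by_cases hg : 1 < pvC stock a
        · rw [if_pos ⟨hd, hg⟩]
          rw [ih (P ++ [a]) _ _ hnd' (fun b hb => hsub b (List.mem_cons_of_mem a hb)) hinv]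
          rw [if_pos (by omega : s - a = a), pv_tdiv_eq_fdiv _ (by omega)]
          ring
        · have hc1 : pvC stock a = 1 := by omega
          rw [if_neg (by tauto), if_neg (by tauto)]
          rw [ih (P ++ [a]) _ _ hnd' (fun b hb => hsub b (List.mem_cons_of_mem a hb)) hinv]
          rw [if_pos (by omega : s - a = a), hc1]
          norm_num [show PySem.Int.floordiv 1 2 = 0 from by decide]
      · rw [if_neg (by tauto)]
        have hne : ¬ s - a = a := fun e => hd e.symm
        by_cases hm : (s - a) ∈ stock
        · rw [if_pos ⟨hd, hm⟩]
          rw [ih (P ++ [a]) _ _ hnd' (fun b hb => hsub b (List.mem_cons_of_mem a hb)) hinv]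
          rw [if_neg hne, if_pos hm]
          ring
        · rw [if_neg (by tauto)]
          rw [ih (P ++ [a]) _ _ hnd' (fun b hb => hsub b (List.mem_cons_of_mem a hb)) hinv]
          rw [if_neg hne, if_neg hm]
          ring

theorem pv_mem_sumsA (vals : List Int) (s : Int) :
    (s ∈ (PySem.List.pyRange 0 (PySem.List.len vals) 1).flatMap (fun i =>
      (PySem.List.pyRange i (PySem.List.len vals) 1).map (fun j =>
        PySem.List.pyGetD vals i 0 + PySem.List.pyGetD vals j 0)))
    ↔ ∃ a ∈ vals, ∃ b ∈ vals, s = a + b := by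
  simp only [List.mem_flatMap, List.mem_map, PySem.List.mem_pyRange_one, PySem.List.len_eq]
  constructor
  · rintro ⟨i, ⟨h0, hn⟩, j, ⟨hij, hjn⟩, rfl⟩
    rw [PySem.List.pyGetD_eq_getElem vals 0 h0 hn,
        PySem.List.pyGetD_eq_getElem vals 0 (by omega) hjn]
    exact ⟨_, vals.getElem_mem _, _, vals.getElem_mem _, rfl⟩
  · rintro ⟨a, ha, b, hb, rfl⟩
    obtain ⟨ia, hia, rfl⟩ := List.mem_iff_getElem.mp ha
    obtain ⟨ib, hib, rfl⟩ := List.mem_iff_getElem.mp hb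
    rcases le_total ia ib with hle | hle
    · refine ⟨(ia : Int), ⟨by omega, by exact_mod_cast hia⟩,
        (ib : Int), ⟨by exact_mod_cast hle, by exact_mod_cast hib⟩, ?_⟩
      rw [PySem.List.pyGetD_eq_getElem vals 0 (by omega) (by exact_mod_cast hia),
          PySem.List.pyGetD_eq_getElem vals 0 (by omega) (by exact_mod_cast hib)]
      simp
    · refine ⟨(ib : Int), ⟨by omega, by exact_mod_cast hib⟩,
        (ia : Int), ⟨by exact_mod_cast hle, by exact_mod_cast hia⟩, ?_⟩
      rw [PySem.List.pyGetD_eq_getElem vals 0 (by omega) (by exact_mod_cast hib),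
          PySem.List.pyGetD_eq_getElem vals 0 (by omega) (by exact_mod_cast hia)]
      simp [Int.add_comm]

theorem pv_enum_fold0 (stock r : List Int) (d : PySem.Dict Int Int) :
    (PySem.List.enumerate r).foldl (fun d ia =>
        (PySem.List.slice r (some (ia.1 + 1)) none).foldl
          (fun d b => d.insert (ia.2 + b) (d.getD (ia.2 + b) 0 + min (pvC stock ia.2) (pvC stock b)))
          (d.insert (ia.2 + ia.2) (d.getD (ia.2 + ia.2) 0 + PySem.Int.floordiv (pvC stock ia.2) 2))) d
      = pvGo stock r d := by
  have h := pv_enum_fold stock r [] d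
  simpa using h

theorem pv_main (stock : List Int) : optim_sets stock = optim_sets_alt stock := by
  unfold optim_sets optim_sets_alt
  simp only []
  rw [pv_groups_eq, pv_counts_eq]
  simp only [PySem.Dict.getD_counter, PySem.Dict.contains_counter, PySem.Dict.keys_counter,
    List.contains_iff_mem]
  rw [pv_enum_fold0]
  simp only [PySem.List.foldl_append_singleton_eq_map, PySem.List.foldl_append_eq_flatMap,
    List.nil_append]
  have hkeys : (pvGo stock (PySem.Set.ofList stock) PySem.Dict.empty).keys
      = PySem.Set.ofList (pvSums (PySem.Set.ofList stock)) := by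
    rw [pv_keys_pvGo, PySem.Dict.keys_empty, PySem.Set.update_nil_left]
  rw [PySem.Dict.items_eq_map_keys _ (by rw [hkeys]; exact PySem.Set.nodup_ofList _) 0,
    List.foldl_map, hkeys]
  simp only [pv_getD_pvGo, PySem.Set.nodup_ofList, PySem.Dict.getD_empty, zero_add]
  rw [PySem.List.foldl_congr_mem _ _
    (fun best_N sum_val => max best_N (pvFB stock sum_val (PySem.Set.ofList stock)
        + pvC stock sum_val)) _ ?_]
  · refine List.Perm.foldl_eq (rcomm := ⟨fun b x y => by omega⟩) ?_ _
    rw [List.perm_ext_iff_of_nodup (PySem.Set.nodup_ofList _) (PySem.Set.nodup_ofList _)]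
    intro s
    rw [PySem.Set.mem_ofList, PySem.Set.mem_ofList, pv_mem_sumsA, pv_mem_pvSums]
  · intro acc s hs
    rw [pv_A_inner stock s (PySem.Set.ofList stock) [] []
      (if s ∈ stock then (↑(List.count s stock) : Int) else 0)
      (by simp [PySem.Set.nodup_ofList])
      (fun a ha => (PySem.Set.mem_ofList _ _).mp ha)
      (by simp)]
    rw [pv_F_eq_FB stock s (PySem.Set.ofList stock) [] rfl]
    show max acc _ = max acc _
    congr 1
    by_cases hm : s ∈ stock
    · simp only [if_pos hm]
      ring
    · have h0 : pvC stock s = 0 := by simp [pvC, List.count_eq_zero.mpr hm]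
      rw [if_neg hm, h0]
      ring

-- ===== VERDICT (by name: the statement is the Claim_ definition above) =====
theorem optim_sets_spec : Claim_equal_optim_sets := by
  intro stock _ _
  unfold Spec_optim_sets
  exact pv_main stock
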